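-- pv_equiv track=rewrite | github.com/Volcann/M2MasterBot | tests/remove_redundant_test.py | remove_redundant_values
-- ===== SOURCE A (Python) =====
-- GRID_ROWS = 7
--
-- GRID_COLS = 5
--
-- def remove_redundant_values(matrix, available_values=None, target_value=None):
--     values_to_remove = []
--
--     if available_values is None:
--         available_values = [2, 4]
--
--     if target_value is None:
--         return [2, 4], matrix
--
--     current_value = target_value
--     while current_value >= 2:
--         values_to_remove.append(current_value)
--         current_value //= 2
--
--     for value in values_to_remove:
--         if value in available_values:
--             available_values.remove(value)
--
--         for row_index in range(GRID_ROWS):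
--             for col_index in range(GRID_COLS):
--                 if (
--                     row_index < len(matrix)
--                     and col_index < len(matrix[row_index])
--                     and matrix[row_index][col_index] == value
--                 ):
--                     matrix[row_index][col_index] = 0
--
--     return available_values, matrix
-- ===== SOURCE B (Python) =====
-- GRID_ROWS = 7
--
-- GRID_COLS = 5
--
-- def remove_redundant_values(matrix, available_values=None, target_value=None):
--     # Build the halving chain once, then remove its values from available_values
--     # and zero matching in-grid cells in a SINGLE pass over the matrix.
--     # Note: rebinds matrix[r] to fresh row lists instead of mutating rows in place.
--     if target_value is None:
--         return [2, 4], matrix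
--
--     if available_values is None:
--         available_values = [2, 4]
--
--     chain = []
--     value = target_value
--     while value >= 2:
--         chain.append(value)
--         value //= 2
--
--     to_remove = set(chain)
--
--     for value in chain:
--         if value in available_values:
--             available_values.remove(value)
--
--     for row_index, row in enumerate(matrix):
--         if row_index < GRID_ROWS:
--             matrix[row_index] = [
--                 0 if (col_index < GRID_COLS and cell in to_remove) else cell
--                 for col_index, cell in enumerate(row)
--             ]
--
--     return available_values, matrix
-- ===== Notes on version B (the rewrite author's own statement) =====
-- stated objective: simpler
-- what changed: B builds the halving chain once into a set and zeroes matching in-grid cells in a single pass over the matrix (one comprehension per row), instead of A's one full 7x5 grid rescan per chain value.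
import Mathlib
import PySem

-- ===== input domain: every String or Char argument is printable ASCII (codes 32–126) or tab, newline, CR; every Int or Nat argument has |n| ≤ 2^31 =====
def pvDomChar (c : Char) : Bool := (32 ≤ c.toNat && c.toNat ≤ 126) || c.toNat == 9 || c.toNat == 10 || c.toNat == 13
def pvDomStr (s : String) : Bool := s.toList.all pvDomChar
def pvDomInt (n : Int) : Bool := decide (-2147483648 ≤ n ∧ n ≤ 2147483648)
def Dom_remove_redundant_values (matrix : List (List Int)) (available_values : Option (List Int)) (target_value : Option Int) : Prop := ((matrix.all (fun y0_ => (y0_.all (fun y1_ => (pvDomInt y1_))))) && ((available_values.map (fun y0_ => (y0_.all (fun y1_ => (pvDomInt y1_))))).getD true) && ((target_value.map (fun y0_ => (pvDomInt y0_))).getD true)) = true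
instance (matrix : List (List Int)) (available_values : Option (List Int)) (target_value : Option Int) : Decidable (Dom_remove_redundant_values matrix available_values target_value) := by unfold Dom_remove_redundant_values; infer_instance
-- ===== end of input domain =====

-- B builds the halving chain once into a set and zeroes matching in-grid cells in a single
-- pass over the matrix, instead of A's one full 7x5 grid rescan per chain value (objective:
-- simpler). Both Pythons mutate their arguments; the equivalence proved here is about the
-- RETURN value only (B rebinds matrix rows to fresh lists where A mutates rows in place).

-- ===== PORT A =====
-- the 'while current_value >= 2' loop collecting values_to_remove
def pvChainA (v : Int) : List Int :=
  if _h : 2 ≤ v then v :: pvChainA (PySem.Int.floordiv v 2) else []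
termination_by v.toNat
decreasing_by
  rw [PySem.Int.floordiv_eq_ediv_of_pos (by omega : (0:Int) < 2)]
  omega

-- the body of A's nested 'for row_index / for col_index' loops (one guarded cell update)
def pvZeroCellA (value : Int) (m : List (List Int)) (ri ci : Int) : List (List Int) :=
  if ri < PySem.List.len m ∧ ci < PySem.List.len (PySem.List.pyGetD m ri []) ∧
      PySem.List.pyGetD (PySem.List.pyGetD m ri []) ci 0 = value then
    PySem.List.pySetD m ri (PySem.List.pySetD (PySem.List.pyGetD m ri []) ci 0)
  else m

-- one full grid rescan for a single value (A's inner double loop)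
def pvPassA (m : List (List Int)) (value : Int) : List (List Int) :=
  (PySem.List.pyRange 0 7 1).foldl
    (fun m ri => (PySem.List.pyRange 0 5 1).foldl (fun m ci => pvZeroCellA value m ri ci) m) m

def remove_redundant_values (matrix : List (List Int)) (available_values : Option (List Int)) (target_value : Option Int) : List Int × List (List Int) :=
  let available := match available_values with
    | none => [2, 4]
    | some l => l
  match target_value with
  | none => ([2, 4], matrix)
  | some target =>
      let values_to_remove := pvChainA target
      values_to_remove.foldl
        (fun st value =>
          ((if value ∈ st.1 then (PySem.List.remove? st.1 value).getD st.1 else st.1),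
           pvPassA st.2 value))
        (available, matrix)

-- ===== PORT B =====
-- the same 'while value >= 2' chain loop of Source B
def pvChainB (v : Int) : List Int :=
  if _h : 2 ≤ v then v :: pvChainB (PySem.Int.floordiv v 2) else []
termination_by v.toNat
decreasing_by
  rw [PySem.Int.floordiv_eq_ediv_of_pos (by omega : (0:Int) < 2)]
  omega

def remove_redundant_values_alt (matrix : List (List Int)) (available_values : Option (List Int)) (target_value : Option Int) : List Int × List (List Int) :=
  match target_value with
  | none => ([2, 4], matrix)
  | some target =>
      let available := match available_values with
        | none => [2, 4]
        | some l => l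
      let chain := pvChainB target
      let toRemove : PySem.Set Int := PySem.Set.ofList chain
      let av := chain.foldl
        (fun av value => if value ∈ av then (PySem.List.remove? av value).getD av else av)
        available
      let m := (PySem.List.enumerate matrix 0).map (fun rc =>
        if rc.1 < 7 then
          (PySem.List.enumerate rc.2 0).map
            (fun cx => if cx.1 < 5 ∧ PySem.Set.contains toRemove cx.2 then 0 else cx.2)
        else rc.2)
      (av, m)

-- ===== PRECONDITION & SPEC =====
def Spec_remove_redundant_values (matrix : List (List Int)) (available_values : Option (List Int)) (target_value : Option Int) (out : List Int × List (List Int)) : Prop := out = remove_redundant_values_alt matrix available_values target_value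
instance (matrix : List (List Int)) (available_values : Option (List Int)) (target_value : Option Int) (out : List Int × List (List Int)) : Decidable (Spec_remove_redundant_values matrix available_values target_value out) := by unfold Spec_remove_redundant_values; infer_instance

-- ===== CLAIM (what is proved, stated in full; the proofs are below) =====
def Claim_equal_remove_redundant_values : Prop := ∀ (matrix : List (List Int)) (available_values : Option (List Int)) (target_value : Option Int), Dom_remove_redundant_values matrix available_values target_value → Spec_remove_redundant_values matrix available_values target_value (remove_redundant_values matrix available_values target_value)

-- ===== LEMMAS AND PROOFS =====

-- the two ports' chain loops are the same loop
theorem pvChainA_eq_chainB (v : Int) : pvChainA v = pvChainB v := by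
  rw [pvChainA, pvChainB]
  split
  · rw [pvChainA_eq_chainB (PySem.Int.floordiv v 2)]
  · rfl
termination_by v.toNat
decreasing_by
  rw [PySem.Int.floordiv_eq_ediv_of_pos (by omega : (0:Int) < 2)]
  omega

theorem pvChain_two_le {v x : Int} (hx : x ∈ pvChainA v) : 2 ≤ x := by
  rw [pvChainA] at hx
  split at hx
  · rcases List.mem_cons.1 hx with h | h
    · omega
    · exact pvChain_two_le h
  · simp at hx
termination_by v.toNat
decreasing_by
  rw [PySem.Int.floordiv_eq_ediv_of_pos (by omega : (0:Int) < 2)]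
  omega

-- proof-side accessors for a cell and a row length (total, with defaults)
def pvCell (m : List (List Int)) (r c : Nat) : Int := (m.getD r []).getD c 0
def pvRowLen (m : List (List Int)) (r : Nat) : Nat := (m.getD r []).length

theorem pvZeroCellA_length (value : Int) (m : List (List Int)) (ri ci : Int) :
    (pvZeroCellA value m ri ci).length = m.length := by
  unfold pvZeroCellA
  split
  · exact PySem.List.length_pySetD ..
  · rfl

theorem pvZeroCellA_rowLen (value : Int) (m : List (List Int)) {ri ci : Int}
    (hri : 0 ≤ ri) (hci : 0 ≤ ci) (r : Nat) :
    pvRowLen (pvZeroCellA value m ri ci) r = pvRowLen m r := by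
  unfold pvZeroCellA pvRowLen
  split
  · rename_i hcond
    simp only [PySem.List.pyGetD_of_nonneg _ _ hri, PySem.List.pySetD_of_nonneg _ _ hri,
      PySem.List.pySetD_of_nonneg _ _ hci, PySem.List.len_eq] at *
    simp only [List.getD_eq_getElem?_getD, List.getElem?_set]
    split_ifs with h1 h2
    · subst h1; simp [List.length_set]
    · omega
    · rfl
  · rfl

theorem pvZeroCellA_cell (value : Int) (m : List (List Int)) {ri ci : Int}
    (hri : 0 ≤ ri) (hci : 0 ≤ ci) (r c : Nat) :
    pvCell (pvZeroCellA value m ri ci) r c =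
      if ri = (r : Int) ∧ ci = (c : Int) ∧ r < m.length ∧ c < pvRowLen m r ∧ pvCell m r c = value
      then 0 else pvCell m r c := by
  unfold pvZeroCellA pvCell pvRowLen
  lift ri to ℕ using hri with a
  lift ci to ℕ using hci with b
  simp only [PySem.List.pyGetD_of_nonneg _ _ (Int.natCast_nonneg a),
    PySem.List.pyGetD_of_nonneg _ _ (Int.natCast_nonneg b),
    PySem.List.pySetD_of_nonneg _ _ (Int.natCast_nonneg a),
    PySem.List.pySetD_of_nonneg _ _ (Int.natCast_nonneg b),
    PySem.List.len_eq, Int.toNat_natCast, Nat.cast_lt, Nat.cast_inj]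
  simp only [List.getD_eq_getElem?_getD]
  split_ifs with h1 h2 h3
  · -- updated and the target cell is exactly (a, b)
    obtain ⟨hr, hc, hrl, hcl, hval⟩ := h2
    subst hr hc
    have hcl' : b < m[a].length := by simpa [List.getElem?_eq_getElem, hrl] using hcl
    simp [hrl, hcl']
  · -- updated, but the observed cell is a different one
    rcases eq_or_ne a r with hr | hr
    · rcases eq_or_ne b c with hc | hc
      · exfalso; subst hr hc; exact h2 ⟨rfl, rfl, h1.1, h1.2.1, h1.2.2⟩
      · subst hr; simp [hc, h1.1]
    · simp [hr]
  · -- no update although the observed cell matches: contradiction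
    exfalso
    obtain ⟨hr, hc, hrl, hcl, hval⟩ := h3
    exact h1 ⟨by omega, by rw [hr, hc]; exact hcl, by rw [hr, hc]; exact hval⟩
  · rfl

-- a fold of guarded cell updates over any list of nonnegative index pairs, cell by cell
theorem pvFoldPairs_char (value : Int) (hv : value ≠ 0) (P : List (Int × Int))
    (hP : ∀ p ∈ P, 0 ≤ p.1 ∧ 0 ≤ p.2) (m : List (List Int)) :
    (P.foldl (fun m p => pvZeroCellA value m p.1 p.2) m).length = m.length ∧
    (∀ r, pvRowLen (P.foldl (fun m p => pvZeroCellA value m p.1 p.2) m) r = pvRowLen m r) ∧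
    (∀ r c, pvCell (P.foldl (fun m p => pvZeroCellA value m p.1 p.2) m) r c =
      if ((r : Int), (c : Int)) ∈ P ∧ r < m.length ∧ c < pvRowLen m r ∧ pvCell m r c = value
      then 0 else pvCell m r c) := by
  induction P using List.reverseRecOn with
  | nil => simp
  | append_singleton P p ih =>
    have hp := hP p (by simp)
    have hP' : ∀ q ∈ P, 0 ≤ q.1 ∧ 0 ≤ q.2 := fun q hq => hP q (by simp [hq])
    obtain ⟨ihl, ihrl, ihc⟩ := ih hP'
    rw [List.foldl_append] at *
    simp only [List.foldl_cons, List.foldl_nil]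
    refine ⟨?_, ?_, ?_⟩
    · rw [pvZeroCellA_length, ihl]
    · intro r; rw [pvZeroCellA_rowLen _ _ hp.1 hp.2, ihrl]
    · intro r c
      rw [pvZeroCellA_cell _ _ hp.1 hp.2, ihc, ihl, ihrl]
      have h0 : (0:Int) ≠ value := fun h => hv h.symm
      by_cases hin : ((r:Int),(c:Int)) ∈ P <;> by_cases hb : r < m.length ∧ c < pvRowLen m r <;>
        by_cases hval : pvCell m r c = value <;> by_cases hpr : p = ((r:Int),(c:Int)) <;>
        simp_all [List.mem_append, Prod.ext_iff] <;> first | tauto | (split_ifs <;> omega)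

theorem pvPassA_char (value : Int) (hv : value ≠ 0) (m : List (List Int)) :
    (pvPassA m value).length = m.length ∧
    (∀ r, pvRowLen (pvPassA m value) r = pvRowLen m r) ∧
    (∀ r c, pvCell (pvPassA m value) r c =
      if r < 7 ∧ c < 5 ∧ r < m.length ∧ c < pvRowLen m r ∧ pvCell m r c = value
      then 0 else pvCell m r c) := by
  have hrw : pvPassA m value =
      ((PySem.List.pyRange 0 7 1).flatMap
        (fun ri => (PySem.List.pyRange 0 5 1).map (fun ci => (ri, ci)))).foldl
        (fun m p => pvZeroCellA value m p.1 p.2) m := by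
    unfold pvPassA
    rw [List.foldl_flatMap]
    simp [List.foldl_map]
  have hP : ∀ p ∈ (PySem.List.pyRange 0 7 1).flatMap
      (fun ri => (PySem.List.pyRange 0 5 1).map (fun ci => (ri, ci))), 0 ≤ p.1 ∧ 0 ≤ p.2 := by
    intro p hp
    simp only [List.mem_flatMap, List.mem_map, PySem.List.mem_pyRange_one] at hp
    obtain ⟨ri, hri, ci, hci, rfl⟩ := hp
    exact ⟨hri.1, hci.1⟩
  have hmem : ∀ r c : Nat, (((r : Int), (c : Int)) ∈ (PySem.List.pyRange 0 7 1).flatMap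
      (fun ri => (PySem.List.pyRange 0 5 1).map (fun ci => (ri, ci)))) ↔ (r < 7 ∧ c < 5) := by
    intro r c
    simp only [List.mem_flatMap, List.mem_map, PySem.List.mem_pyRange_one, Prod.ext_iff]
    constructor
    · rintro ⟨ri, hri, ci, hci, h1, h2⟩; omega
    · intro h; exact ⟨r, by omega, c, by omega, rfl, rfl⟩
  obtain ⟨h1, h2, h3⟩ := pvFoldPairs_char value hv _ hP m
  rw [hrw]
  refine ⟨h1, h2, fun r c => ?_⟩
  rw [h3 r c]
  simp only [hmem r c]
  simp [and_assoc]

theorem pvFoldPass_char (V : List Int) (hV : ∀ v ∈ V, v ≠ 0) (m : List (List Int)) :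
    (V.foldl pvPassA m).length = m.length ∧
    (∀ r, pvRowLen (V.foldl pvPassA m) r = pvRowLen m r) ∧
    (∀ r c, pvCell (V.foldl pvPassA m) r c =
      if r < 7 ∧ c < 5 ∧ r < m.length ∧ c < pvRowLen m r ∧ pvCell m r c ∈ V
      then 0 else pvCell m r c) := by
  induction V generalizing m with
  | nil => simp
  | cons v V ih =>
    have hv : v ≠ 0 := hV v (by simp)
    have hV' : ∀ x ∈ V, x ≠ 0 := fun x hx => hV x (by simp [hx])
    obtain ⟨p1, p2, p3⟩ := pvPassA_char v hv m
    obtain ⟨i1, i2, i3⟩ := ih hV' (pvPassA m v)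
    rw [List.foldl_cons]
    refine ⟨by rw [i1, p1], fun r => by rw [i2, p2], fun r c => ?_⟩
    rw [i3 r c, p1, p2, p3 r c]
    have h0V : (0 : Int) ∉ V := fun h => hV' 0 h rfl
    by_cases hb : r < 7 ∧ c < 5 <;>
      by_cases hrest : r < m.length ∧ c < pvRowLen m r <;>
      by_cases hveq : pvCell m r c = v <;>
      by_cases hmemV : pvCell m r c ∈ V <;>
      simp_all [List.mem_cons]

-- A's sequence of per-value grid rescans equals B's single enumerate-and-map pass
theorem pvMatrix_eq (V : List Int) (hV : ∀ v ∈ V, 2 ≤ v) (m : List (List Int)) :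
    V.foldl pvPassA m = (PySem.List.enumerate m 0).map (fun rc =>
      if rc.1 < 7 then
        (PySem.List.enumerate rc.2 0).map
          (fun cx => if cx.1 < 5 ∧ PySem.Set.contains (PySem.Set.ofList V) cx.2 then 0 else cx.2)
      else rc.2) := by
  have hV0 : ∀ v ∈ V, v ≠ 0 := fun v hv => by have := hV v hv; omega
  obtain ⟨hl, hrl, hc⟩ := pvFoldPass_char V hV0 m
  have rowLenAt : ∀ (X : List (List Int)) (r : Nat) (h1 : r < X.length),
      pvRowLen X r = X[r].length := by
    intro X r h1
    unfold pvRowLen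
    rw [List.getD_eq_getElem X [] h1]
  have cellAt : ∀ (X : List (List Int)) (r c : Nat) (h1 : r < X.length)
      (h2 : c < X[r].length), pvCell X r c = X[r][c] := by
    intro X r c h1 h2
    unfold pvCell
    rw [List.getD_eq_getElem X [] h1, List.getD_eq_getElem _ _ h2]
  apply List.ext_getElem
  · simp [hl, PySem.List.length_enumerate]
  · intro r h1 h2
    have hrm : r < m.length := by rwa [hl] at h1
    rw [List.getElem_map, PySem.List.getElem_enumerate]
    simp only [zero_add]
    have hrowlen : (V.foldl pvPassA m)[r].length = m[r].length := by
      rw [← rowLenAt _ _ h1, hrl, rowLenAt _ _ hrm]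
    apply List.ext_getElem
    · rw [hrowlen]
      split
      · simp [PySem.List.length_enumerate]
      · rfl
    · intro c hc1 hc2
      have hcm : c < m[r].length := by rwa [hrowlen] at hc1
      have lhs : (V.foldl pvPassA m)[r][c] = pvCell (V.foldl pvPassA m) r c :=
        (cellAt _ _ _ h1 hc1).symm
      rw [lhs, hc r c, rowLenAt _ _ hrm, cellAt _ _ _ hrm hcm]
      by_cases hr7i : (r : Int) < 7
      · have hr7 : r < 7 := by omega
        simp only [hr7i, if_true]
        rw [List.getElem_map, PySem.List.getElem_enumerate]
        simp only [zero_add]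
        by_cases hc5i : (c : Int) < 5
        · have hc5 : c < 5 := by omega
          by_cases hmem : m[r][c] ∈ V
          · rw [if_pos ⟨hr7, hc5, hrm, hcm, hmem⟩]
            rw [if_pos ⟨hc5i, (PySem.Set.contains_iff _ _).2 ((PySem.Set.mem_ofList _ _).2 hmem)⟩]
          · rw [if_neg (by tauto), if_neg ?_]
            rintro ⟨-, hcon⟩
            exact hmem ((PySem.Set.mem_ofList _ _).1 ((PySem.Set.contains_iff _ _).1 hcon))
        · rw [if_neg (by omega), if_neg (by rintro ⟨h, -⟩; omega)]
      · have hn7 : ¬ (r < 7) := by omega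
        simp only [hr7i, if_false]
        rw [if_neg (by tauto)]

-- ===== VERDICT (by name: the statement is the Claim_ definition above) =====
theorem remove_redundant_values_spec : Claim_equal_remove_redundant_values := by
  intro matrix available_values target_value _hdom
  unfold Spec_remove_redundant_values
  cases target_value with
  | none => cases available_values <;> rfl
  | some target =>
    have h2le : ∀ v ∈ pvChainB target, 2 ≤ v := by
      intro v hv
      rw [← pvChainA_eq_chainB] at hv
      exact pvChain_two_le hv
    unfold remove_redundant_values remove_redundant_values_alt
    simp only [pvChainA_eq_chainB]
    rw [PySem.List.foldl_prod_mk
      (f := fun av value => if value ∈ av then (PySem.List.remove? av value).getD av else av)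
      (g := fun m value => pvPassA m value)]
    rw [pvMatrix_eq (pvChainB target) h2le matrix]
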